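-- pv_equiv track=rewrite | github.com/benthegeek01/advent-of-code | 2023/day_4/scratchcards.py | part_2
-- ===== SOURCE A (Python) =====
-- from collections import defaultdict
--
-- def part_2(cards: list[tuple[set[int], set[int]]]) -> int:
--     count = defaultdict(lambda: 0)
--
--     for card_num, card in enumerate(cards):
--         count[card_num] += 1
--         matches = match_count(card)
--         for i in range(card_num + 1, card_num + matches + 1):
--             count[i] += count[card_num]
--
--     return sum(count.values())
--
-- def match_count(card: tuple[set[int], set[int]]) -> int:
--     return len(card[0] & card[1])
-- ===== SOURCE B (Python) =====
-- def part_2(cards: list[tuple[set[int], set[int]]]) -> int: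
--     # Total scratchcards = the originals plus every card spawned: each processed
--     # copy of card j spawns one copy of each of the next m cards.  Copy counts
--     # are computed in one pass with a difference array (running prefix sum).
--     n = len(cards)
--     delta = [0] * (n + 1)
--     pending = 0
--     total = n
--     for j, (winning, have) in enumerate(cards):
--         pending += delta[j]
--         copies = 1 + pending
--         m = len(winning & have)
--         total += copies * m
--         delta[j + 1] += copies
--         delta[min(n, j + m + 1)] -= copies
--     return total
-- ===== Notes on version B (the rewrite author's own statement) =====
-- stated objective: alternative
-- what changed: A cascades each card's copies into a defaultdict with an inner increment loop over its match range; B makes a single pass that maintains copy counts via a difference array (running prefix delta) and totals originals plus spawned cards (total += copies * matches), removing the dict and the inner loop.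
import Mathlib
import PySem

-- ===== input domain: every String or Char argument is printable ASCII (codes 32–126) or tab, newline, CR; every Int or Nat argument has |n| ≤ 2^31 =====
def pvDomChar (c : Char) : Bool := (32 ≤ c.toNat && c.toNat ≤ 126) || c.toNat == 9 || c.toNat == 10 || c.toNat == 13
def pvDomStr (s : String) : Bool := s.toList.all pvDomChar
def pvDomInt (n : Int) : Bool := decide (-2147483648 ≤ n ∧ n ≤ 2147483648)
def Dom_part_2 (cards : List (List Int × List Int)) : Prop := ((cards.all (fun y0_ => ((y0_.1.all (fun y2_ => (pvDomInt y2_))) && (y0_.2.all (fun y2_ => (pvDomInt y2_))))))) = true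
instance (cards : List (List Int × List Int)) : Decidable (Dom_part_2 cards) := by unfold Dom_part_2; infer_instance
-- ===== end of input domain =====

-- B replaces A's per-card inner increment loop over a defaultdict by a single pass
-- that keeps copy counts in a difference array and totals originals + spawned cards
-- (alternative single-pass algorithm; not measured faster on the benchmark family).


-- ===== PORT A =====
-- match_count(card) = len(card[0] & card[1]); the arguments are Python sets, so each
-- list is normalised with Set.ofList (the identity on duplicate-free lists) before Set.inter.
def match_count (card : List Int × List Int) : Int :=
  (PySem.Set.inter (PySem.Set.ofList card.1) card.2).length

def part_2 (cards : List (List Int × List Int)) : Int :=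
  let count : PySem.Dict Int Int :=
    (PySem.List.enumerate cards 0).foldl (fun d p =>
      let d := d.modify p.1 0 (· + 1)
      let nmatches := match_count p.2
      (PySem.List.pyRange (p.1 + 1) (p.1 + nmatches + 1) 1).foldl
        (fun d i => d.modify i 0 (· + d.getD p.1 0)) d)
      PySem.Dict.empty
  count.values.sum

-- ===== PORT B =====
def part_2_alt (cards : List (List Int × List Int)) : Int :=
  let n : Int := cards.length
  let st : List Int × Int × Int :=
    (PySem.List.enumerate cards 0).foldl (fun st p =>
      let delta := st.1
      let pending := st.2.1 + PySem.List.pyGetD delta p.1 0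
      let copies := 1 + pending
      let m : Int := (PySem.Set.inter (PySem.Set.ofList p.2.1) p.2.2).length
      let total := st.2.2 + copies * m
      let delta := PySem.List.pySetD delta (p.1 + 1)
        (PySem.List.pyGetD delta (p.1 + 1) 0 + copies)
      let e := min n (p.1 + m + 1)
      let delta := PySem.List.pySetD delta e (PySem.List.pyGetD delta e 0 - copies)
      (delta, pending, total))
      (List.replicate (cards.length + 1) 0, 0, n)
  st.2.2

-- ===== PRECONDITION & SPEC =====
def Spec_part_2 (cards : List (List Int × List Int)) (out : Int) : Prop := out = part_2_alt cards
instance (cards : List (List Int × List Int)) (out : Int) : Decidable (Spec_part_2 cards out) := by unfold Spec_part_2; infer_instance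

-- ===== CLAIM (what is proved, stated in full; the proofs are below) =====
def Claim_equal_part_2 : Prop := ∀ (cards : List (List Int × List Int)), Dom_part_2 cards → Spec_part_2 cards (part_2 cards)

-- ===== LEMMAS AND PROOFS =====

-- The shared model.  Mv j = number of matches of card j; cv j = number of copies of
-- card j produced by the cascade; Vv k i = value of dict entry i after k cards were
-- processed; keyP k i = "key i is present after k cards were processed".
def Mv (cards : List (List Int × List Int)) (j : Nat) : Nat :=
  (PySem.Set.inter (PySem.Set.ofList (cards.getD j ([],[])).1) (cards.getD j ([],[])).2).length

def cv (cards : List (List Int × List Int)) : Nat → Int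
  | j => 1 + ((List.range j).attach.map (fun x =>
      if j ≤ x.1 + Mv cards x.1 then cv cards x.1 else 0)).sum
termination_by j => j
decreasing_by exact List.mem_range.mp x.2

lemma cv_eq (cards : List (List Int × List Int)) (j : Nat) :
    cv cards j = 1 + ((List.range j).map (fun j' => if j ≤ j' + Mv cards j' then cv cards j' else 0)).sum := by
  rw [cv, List.attach_map_val (l := List.range j)
    (f := fun j' => if j ≤ j' + Mv cards j' then cv cards j' else 0)]

def Vv (cards : List (List Int × List Int)) (k : Nat) (i : Int) : Int :=
  (if 0 ≤ i ∧ i < (k:Int) then 1 else 0) +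
  ((List.range k).map (fun j : Nat => if (j:Int) < i ∧ i ≤ (j:Int) + (Mv cards j : Int) then cv cards j else 0)).sum

def keyP (cards : List (List Int × List Int)) (k : Nat) (i : Int) : Prop :=
  (0 ≤ i ∧ i < (k:Int)) ∨ ∃ j < k, (j:Int) < i ∧ i ≤ (j:Int) + (Mv cards j : Int)

-- B-side model: delta array entries, pending and total accumulators after k steps.
def eminv (cards : List (List Int × List Int)) (j : Nat) : Nat :=
  min cards.length (j + Mv cards j + 1)

def Dv (cards : List (List Int × List Int)) (k t : Nat) : Int :=
  ∑ j ∈ Finset.range k, ((if j + 1 = t then cv cards j else 0) - (if eminv cards j = t then cv cards j else 0))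

def Pv (cards : List (List Int × List Int)) (k : Nat) : Int :=
  ∑ j ∈ Finset.range k, (if j + 1 < k ∧ k ≤ j + Mv cards j + 1 then cv cards j else 0)

def Tv (cards : List (List Int × List Int)) (k : Nat) : Int :=
  (cards.length : Int) + ∑ j ∈ Finset.range k, cv cards j * (Mv cards j : Int)

-- small list facts
lemma getD_set (xs : List Int) (k t : Nat) (v : Int) (h : k < xs.length) :
    (xs.set k v).getD t 0 = if t = k then v else xs.getD t 0 := by
  rw [List.getD_eq_getElem?_getD, List.getElem?_set, List.getD_eq_getElem?_getD]
  rcases eq_or_ne t k with rfl | hne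
  · rw [if_pos rfl, if_pos rfl, if_pos h]; rfl
  · rw [if_neg (Ne.symm hne), if_neg hne]

lemma getD_replicate (m t : Nat) : (List.replicate m (0:Int)).getD t 0 = 0 := by
  simp [List.getD_eq_getElem?_getD, List.getElem?_replicate]
  split <;> simp

lemma getD_of_drop_cons {α : Type} (cards : List α) (k : Nat) (p : α) (rest : List α) (d0 : α)
    (h : cards.drop k = p :: rest) : cards.getD k d0 = p := by
  have h1 : cards[k]? = some p := by
    have : (List.drop k cards)[0]? = cards[k + 0]? := List.getElem?_drop
    simp [h] at this; simp [← this]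
  simp [List.getD_eq_getElem?_getD, h1]

lemma drop_succ_of_drop_cons {α : Type} (cards : List α) (k : Nat) (p : α) (rest : List α)
    (h : cards.drop k = p :: rest) : cards.drop (k+1) = rest := by
  have : List.drop 1 (List.drop k cards) = List.drop (k + 1) cards := by
    rw [List.drop_drop]
  rw [← this, h]; rfl

lemma pyRange_nil {a b : Int} (h : b ≤ a) : PySem.List.pyRange a b 1 = [] := by
  simp [PySem.List.pyRange]; omega

-- the value of the dict at key k just before card k's inner loop runs
lemma Vv_self (cards : List (List Int × List Int)) (k : Nat) :
    Vv cards k (k:Int) = cv cards k - 1 := by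
  rw [Vv, cv_eq]
  have h1 : ((List.range k).map (fun j : Nat => if (j:Int) < (k:Int) ∧ (k:Int) ≤ (j:Int) + (Mv cards j : Int) then cv cards j else 0))
      = (List.range k).map (fun j' => if k ≤ j' + Mv cards j' then cv cards j' else 0) := by
    apply List.map_congr_left
    intro j hj
    have hjk := List.mem_range.mp hj
    split_ifs <;> first | rfl | (exfalso; omega)
  rw [h1]
  have : ¬ (0 ≤ (k:Int) ∧ (k:Int) < (k:Int)) := by omega
  rw [if_neg this]
  ring

lemma Vv_succ (cards : List (List Int × List Int)) (k : Nat) (i : Int) :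
    Vv cards (k+1) i =
      Vv cards k i + (if i = (k:Int) then 1 else 0) +
      (if (k:Int) < i ∧ i ≤ (k:Int) + (Mv cards k : Int) then cv cards k else 0) := by
  rw [Vv, Vv, List.range_succ, List.map_append, List.sum_append]
  have h1 : (if 0 ≤ i ∧ i < ((k:Nat)+1 : Int) then (1:Int) else 0)
      = (if 0 ≤ i ∧ i < (k:Int) then (1:Int) else 0) + (if i = (k:Int) then 1 else 0) := by
    split_ifs <;> push_cast <;> omega
  push_cast at h1 ⊢
  rw [h1]

  simp only [List.map_cons, List.map_nil, List.sum_cons, List.sum_nil, add_zero]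
  ring

lemma keyP_succ (cards : List (List Int × List Int)) (k : Nat) (i : Int) :
    keyP cards (k+1) i ↔
      keyP cards k i ∨ i = (k:Int) ∨ ((k:Int) < i ∧ i ≤ (k:Int) + (Mv cards k : Int)) := by
  unfold keyP
  constructor
  · rintro (h | ⟨j, hj, hji⟩)
    · rcases eq_or_ne i (k:Int) with rfl | hne
      · exact Or.inr (Or.inl rfl)
      · left; left; push_cast at h ⊢; omega
    · rcases Nat.lt_succ_iff_lt_or_eq.mp hj with hjk | rfl
      · exact Or.inl (Or.inr ⟨j, hjk, hji⟩)
      · exact Or.inr (Or.inr hji)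
  · rintro ((h | ⟨j, hj, hji⟩) | rfl | h)
    · left; push_cast at h ⊢; omega
    · exact Or.inr ⟨j, Nat.lt_succ_of_lt hj, hji⟩
    · left; constructor <;> push_cast <;> omega
    · exact Or.inr ⟨k, Nat.lt_succ_self k, h⟩

lemma Vv_eq_zero (cards : List (List Int × List Int)) (k : Nat) (i : Int)
    (h : ¬ keyP cards k i) : Vv cards k i = 0 := by
  unfold keyP at h
  have h1 : ¬ (0 ≤ i ∧ i < (k:Int)) := fun hc => h (Or.inl hc)
  have h2 : ∀ j, j < k → ¬ ((j:Int) < i ∧ i ≤ (j:Int) + (Mv cards j : Int)) :=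
    fun j hj hc => h (Or.inr ⟨j, hj, hc⟩)
  rw [Vv, if_neg h1]
  have : ∀ x ∈ (List.range k).map (fun j : Nat => if (j:Int) < i ∧ i ≤ (j:Int) + (Mv cards j : Int) then cv cards j else 0), x = 0 := by
    intro x hx
    rcases List.mem_map.mp hx with ⟨j, hj, rfl⟩
    exact if_neg (h2 j (List.mem_range.mp hj))
  rw [List.sum_eq_zero this, zero_add]

-- A's inner loop: adds cval0 to every key in [a, b) and keeps key K0 intact.
lemma innerA (K0 cval0 : Int) : ∀ (fuel : Nat) (a b : Int), fuel = (b - a).toNat →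
    ∀ (d : PySem.Dict Int Int), K0 < a → d.getD K0 0 = cval0 → d.keys.Nodup →
    (((PySem.List.pyRange a b 1).foldl (fun d i => d.modify i 0 (· + d.getD K0 0)) d).keys.Nodup
     ∧ (∀ i, i ∈ ((PySem.List.pyRange a b 1).foldl (fun d i => d.modify i 0 (· + d.getD K0 0)) d).keys ↔ i ∈ d.keys ∨ (a ≤ i ∧ i < b))
     ∧ (∀ i, ((PySem.List.pyRange a b 1).foldl (fun d i => d.modify i 0 (· + d.getD K0 0)) d).getD i 0
          = d.getD i 0 + if a ≤ i ∧ i < b then cval0 else 0)) := by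
  intro fuel
  induction fuel with
  | zero =>
    intro a b hf d hK hc hnd
    have hba : b ≤ a := by omega
    rw [pyRange_nil hba]
    simp only [List.foldl_nil]
    refine ⟨hnd, fun i => ?_, fun i => ?_⟩
    · constructor
      · exact Or.inl
      · rintro (h | h)
        · exact h
        · exact absurd h (by omega)
    · rw [if_neg (by omega : ¬ (a ≤ i ∧ i < b)), add_zero]
  | succ fuel ih =>
    intro a b hf d hK hc hnd
    rcases lt_or_ge a b with hab | hab
    swap
    · rw [pyRange_nil hab]
      simp only [List.foldl_nil]
      refine ⟨hnd, fun i => ?_, fun i => ?_⟩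
      · constructor
        · exact Or.inl
        · rintro (h | h)
          · exact h
          · exact absurd h (by omega)
      · rw [if_neg (by omega : ¬ (a ≤ i ∧ i < b)), add_zero]
    rw [PySem.List.pyRange_one_cons hab]
    simp only [List.foldl_cons]
    have hKa : K0 ≠ a := by omega
    have hd1getK : (d.modify a 0 (· + d.getD K0 0)).getD K0 0 = cval0 := by
      rw [PySem.Dict.getD_modify_of_ne _ _ _ hKa, hc]
    have hd1nd : (d.modify a 0 (· + d.getD K0 0)).keys.Nodup := by
      rw [PySem.Dict.keys_modify]
      exact PySem.Dict.nodup_keys_insert _ _ _ hnd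
    obtain ⟨hnd', hmem', hget'⟩ := ih (a+1) b (by omega) (d.modify a 0 (· + d.getD K0 0)) (by omega) hd1getK hd1nd
    refine ⟨hnd', fun i => ?_, fun i => ?_⟩
    · rw [hmem' i]
      have hmem1 : i ∈ (d.modify a 0 (· + d.getD K0 0)).keys ↔ i = a ∨ i ∈ d.keys := by
        rw [PySem.Dict.keys_modify]
        exact PySem.Dict.mem_keys_insert _ _ _ _
      rw [hmem1]
      constructor
      · rintro ((h0 | h) | h)
        · exact Or.inr ⟨by omega, by omega⟩
        · exact Or.inl h
        · exact Or.inr ⟨by omega, h.2⟩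
      · rintro (h | ⟨h1, h2⟩)
        · exact Or.inl (Or.inr h)
        · rcases eq_or_ne i a with rfl | hne
          · exact Or.inl (Or.inl rfl)
          · exact Or.inr ⟨by omega, h2⟩
    · rw [hget' i, PySem.Dict.getD_modify, hc]
      rcases eq_or_ne i a with hia | hne
      · rw [if_pos hia]
        rw [if_neg (by omega : ¬ (a + 1 ≤ i ∧ i < b)), if_pos ⟨by omega, by omega⟩, hia]
        ring
      · rw [if_neg hne]
        rw [if_congr (by omega : (a + 1 ≤ i ∧ i < b) ↔ (a ≤ i ∧ i < b)) rfl rfl]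

-- A's outer loop invariant
lemma outerA (cards : List (List Int × List Int)) : ∀ (rest : List (List Int × List Int)) (k : Nat)
    (d : PySem.Dict Int Int), rest = cards.drop k → k ≤ cards.length →
    d.keys.Nodup → (∀ i, i ∈ d.keys ↔ keyP cards k i) → (∀ i, d.getD i 0 = Vv cards k i) →
    (((PySem.List.enumerate rest (k:Int)).foldl (fun d p =>
      let d := d.modify p.1 0 (· + 1)
      let nmatches := match_count p.2
      (PySem.List.pyRange (p.1 + 1) (p.1 + nmatches + 1) 1).foldl
        (fun d i => d.modify i 0 (· + d.getD p.1 0)) d) d).keys.Nodup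
     ∧ (∀ i, i ∈ ((PySem.List.enumerate rest (k:Int)).foldl (fun d p =>
      let d := d.modify p.1 0 (· + 1)
      let nmatches := match_count p.2
      (PySem.List.pyRange (p.1 + 1) (p.1 + nmatches + 1) 1).foldl
        (fun d i => d.modify i 0 (· + d.getD p.1 0)) d) d).keys ↔ keyP cards cards.length i)
     ∧ (∀ i, ((PySem.List.enumerate rest (k:Int)).foldl (fun d p =>
      let d := d.modify p.1 0 (· + 1)
      let nmatches := match_count p.2
      (PySem.List.pyRange (p.1 + 1) (p.1 + nmatches + 1) 1).foldl
        (fun d i => d.modify i 0 (· + d.getD p.1 0)) d) d).getD i 0 = Vv cards cards.length i)) := by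
  intro rest
  induction rest with
  | nil =>
    intro k d hdrop hk hnd hmem hget
    have hlen : cards.length ≤ k := List.drop_eq_nil_iff.mp hdrop.symm
    have hkn : k = cards.length := le_antisymm hk hlen
    subst hkn
    simp only [PySem.List.enumerate_nil, List.foldl_nil]
    exact ⟨hnd, hmem, hget⟩
  | cons p rest' ih =>
    intro k d hdrop hk hnd hmem hget
    have hklt : k < cards.length := by
      by_contra h
      have hnil : cards.drop k = [] := List.drop_eq_nil_iff.mpr (by omega)
      rw [hnil] at hdrop
      exact absurd hdrop (by simp)
    have hp : cards.getD k ([],[]) = p := getD_of_drop_cons cards k p rest' ([],[]) hdrop.symm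
    have hpm : match_count p = ((Mv cards k : Nat) : Int) := by
      rw [Mv, hp, match_count]
    rw [PySem.List.enumerate_cons]
    simp only [List.foldl_cons]
    -- the dict after the `count[card_num] += 1` update
    have hd1get : ∀ i, (d.modify (k:Int) 0 (· + 1)).getD i 0
        = Vv cards k i + (if i = (k:Int) then 1 else 0) := by
      intro i
      rw [PySem.Dict.getD_modify, hget, hget]
      split_ifs with h
      · rw [h]
      · ring
    have hd1getk : (d.modify (k:Int) 0 (· + 1)).getD (k:Int) 0 = cv cards k := by
      rw [hd1get, if_pos rfl, Vv_self]; ring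
    have hd1nd : (d.modify (k:Int) 0 (· + 1)).keys.Nodup := by
      rw [PySem.Dict.keys_modify]
      exact PySem.Dict.nodup_keys_insert _ _ _ hnd
    have hd1mem : ∀ i, i ∈ (d.modify (k:Int) 0 (· + 1)).keys ↔ i = (k:Int) ∨ keyP cards k i := by
      intro i
      rw [PySem.Dict.keys_modify]
      rw [PySem.Dict.mem_keys_insert]
      rw [hmem]
    obtain ⟨h2nd, h2mem, h2get⟩ := innerA (k:Int) (cv cards k) (Mv cards k)
      ((k:Int) + 1) ((k:Int) + match_count p + 1)
      (by rw [hpm]; omega)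
      (d.modify (k:Int) 0 (· + 1)) (by omega) hd1getk hd1nd
    have hcast : (k:Int) + 1 = ((k+1 : Nat) : Int) := by push_cast; ring
    rw [hcast] at h2mem h2get ⊢
    apply ih (k+1) _ (drop_succ_of_drop_cons cards k p rest' hdrop.symm).symm (by omega)
    · exact h2nd
    · intro i
      rw [h2mem i, hd1mem i, keyP_succ]
      constructor
      · rintro ((h | h) | h)
        · exact Or.inr (Or.inl h)
        · exact Or.inl h
        · refine Or.inr (Or.inr ⟨by omega, ?_⟩)
          have := h.2; rw [hpm] at this; omega
      · rintro (h | h | h)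
        · exact Or.inl (Or.inr h)
        · exact Or.inl (Or.inl h)
        · refine Or.inr ⟨by omega, ?_⟩
          rw [hpm]; omega
    · intro i
      rw [h2get i, hd1get i, Vv_succ]
      have hiff : (((k+1 : Nat) : Int) ≤ i ∧ i < (k:Int) + match_count p + 1)
          ↔ ((k:Int) < i ∧ i ≤ (k:Int) + (Mv cards k : Int)) := by
        rw [hpm]; push_cast; omega
      rw [if_congr hiff rfl rfl]

-- closed form for A: n real cards plus, for each card j, cv j copies that each add
-- one to Mv j further dict entries (real or phantom alike).
lemma partA_closed (cards : List (List Int × List Int)) :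
    part_2 cards = (cards.length : Int) + ∑ j ∈ Finset.range cards.length, cv cards j * (Mv cards j : Int) := by
  obtain ⟨hnd, hmem, hget⟩ := outerA cards cards 0 PySem.Dict.empty (by simp) (by omega)
    PySem.Dict.nodup_keys_empty
    (by
      intro i
      simp only [PySem.Dict.keys_empty, List.not_mem_nil, false_iff]
      rintro (h | ⟨j, hj, hji⟩)
      · simp at h; omega
      · omega)
    (by
      intro i
      rw [PySem.Dict.getD_empty, Vv]
      simp)
  rw [Nat.cast_zero] at hnd hmem hget
  set n := cards.length with hn
  set dfin : PySem.Dict Int Int := ((PySem.List.enumerate cards (0:Int)).foldl (fun d p =>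
      let d := d.modify p.1 0 (· + 1)
      let nmatches := match_count p.2
      (PySem.List.pyRange (p.1 + 1) (p.1 + nmatches + 1) 1).foldl
        (fun d i => d.modify i 0 (· + d.getD p.1 0)) d) PySem.Dict.empty) with hdfin
  have hpart : part_2 cards = dfin.values.sum := by rw [hdfin]; rfl
  rw [hpart, PySem.Dict.values_eq_map_keys dfin hnd 0]
  have hmapc : dfin.keys.map (fun k => dfin.getD k 0) = dfin.keys.map (Vv cards n) := by
    apply List.map_congr_left
    intro x _
    exact hget x
  rw [hmapc]
  -- bound on the key range
  set Kb := n + ∑ j ∈ Finset.range n, Mv cards j with hKb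
  have hMle : ∀ j, j < n → Mv cards j ≤ ∑ j ∈ Finset.range n, Mv cards j := by
    intro j hj
    exact Finset.single_le_sum (f := fun j => Mv cards j) (fun _ _ => Nat.zero_le _)
      (Finset.mem_range.mpr hj)
  have hbound : ∀ i : Int, keyP cards n i → 0 ≤ i ∧ i < (Kb : Int) := by
    rintro i (⟨h0, h1⟩ | ⟨j, hj, h1, h2⟩)
    · have : (n : Int) ≤ (Kb : Int) := by exact_mod_cast Nat.le_add_right n _
      exact ⟨h0, by omega⟩
    · have hb := hMle j hj
      have : ((j + Mv cards j : Nat) : Int) < (Kb : Int) := by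
        push_cast
        have : (j:Int) < (n:Int) := by exact_mod_cast hj
        push_cast at hb ⊢
        omega
      push_cast at this
      constructor <;> omega
  -- sum over keys = sum over [0, Kb)
  have h1 : (dfin.keys.map (Vv cards n)).sum = ∑ x ∈ dfin.keys.toFinset, Vv cards n x :=
    (List.sum_toFinset _ hnd).symm
  have hsub : dfin.keys.toFinset ⊆ (Finset.range Kb).image (fun i : Nat => (i : Int)) := by
    intro x hx
    have hxk : keyP cards n x := (hmem x).mp (List.mem_toFinset.mp hx)
    obtain ⟨hx0, hx1⟩ := hbound x hxk
    apply Finset.mem_image.mpr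
    refine ⟨x.toNat, Finset.mem_range.mpr ?_, by omega⟩
    omega
  have hz : ∀ x ∈ (Finset.range Kb).image (fun i : Nat => (i : Int)),
      x ∉ dfin.keys.toFinset → Vv cards n x = 0 := by
    intro x _ hx
    apply Vv_eq_zero
    intro hk
    exact hx (List.mem_toFinset.mpr ((hmem x).mpr hk))
  rw [h1, Finset.sum_subset hsub hz,
    Finset.sum_image (fun a _ b _ h => by exact_mod_cast h)]
  -- unfold Vv and split the sum
  have hVv : ∀ i : Nat, Vv cards n (i:Int)
      = (if 0 ≤ (i:Int) ∧ (i:Int) < (n:Int) then (1:Int) else 0)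
        + ∑ j ∈ Finset.range n, (if (j:Int) < (i:Int) ∧ (i:Int) ≤ (j:Int) + (Mv cards j : Int) then cv cards j else 0) := by
    intro i
    rw [Vv]
    rfl
  rw [Finset.sum_congr rfl (fun i _ => hVv i), Finset.sum_add_distrib]
  congr 1
  · -- the "+1 per real card" part sums to n
    have e1 : ∀ i ∈ Finset.range Kb, (if 0 ≤ (i:Int) ∧ (i:Int) < (n:Int) then (1:Int) else 0)
        = if i < n then (1:Int) else 0 := by
      intro i _
      have : (0 ≤ (i:Int) ∧ (i:Int) < (n:Int)) ↔ i < n := by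
        constructor
        · intro h; exact_mod_cast h.2
        · intro h; exact ⟨by positivity, by exact_mod_cast h⟩
      rw [if_congr this rfl rfl]
    rw [Finset.sum_congr rfl e1]
    have hsub2 : Finset.range n ⊆ Finset.range Kb := by
      intro x hx
      simp only [Finset.mem_range] at hx ⊢
      omega
    rw [← Finset.sum_subset hsub2
      (fun x _ hx => if_neg (fun hc => hx (Finset.mem_range.mpr hc)))]
    rw [Finset.sum_congr rfl (fun i hi => if_pos (Finset.mem_range.mp hi))]
    simp
  · -- the cascade part sums to Σ cv j * Mv j
    rw [Finset.sum_comm]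
    apply Finset.sum_congr rfl
    intro j hj
    have hjn := Finset.mem_range.mp hj
    have hjb : j + Mv cards j < Kb := by
      have := hMle j hjn
      omega
    have e2 : ∀ i ∈ Finset.range Kb, (if (j:Int) < (i:Int) ∧ (i:Int) ≤ (j:Int) + (Mv cards j : Int) then cv cards j else 0)
        = if j < i ∧ i ≤ j + Mv cards j then cv cards j else 0 := by
      intro i _
      have : ((j:Int) < (i:Int) ∧ (i:Int) ≤ (j:Int) + (Mv cards j : Int)) ↔ (j < i ∧ i ≤ j + Mv cards j) := by
        constructor
        · intro h
          exact ⟨by exact_mod_cast h.1, by exact_mod_cast (by push_cast; omega : (i:Int) ≤ ((j + Mv cards j : Nat) : Int))⟩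
        · intro h
          refine ⟨by exact_mod_cast h.1, ?_⟩
          have : (i:Int) ≤ ((j + Mv cards j : Nat) : Int) := by exact_mod_cast h.2
          push_cast at this
          omega
      rw [if_congr this rfl rfl]
    rw [Finset.sum_congr rfl e2, ← Finset.sum_filter]
    have hfil : (Finset.range Kb).filter (fun i => j < i ∧ i ≤ j + Mv cards j)
        = Finset.Ioc j (j + Mv cards j) := by
      ext i
      simp only [Finset.mem_filter, Finset.mem_range, Finset.mem_Ioc]
      omega
    rw [hfil, Finset.sum_const, Nat.card_Ioc, nsmul_eq_mul]
    have : j + Mv cards j - j = Mv cards j := by omega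
    rw [this]
    ring

-- B-side step identities
lemma Pv_succ_cv (cards : List (List Int × List Int)) (k : Nat) :
    Pv cards (k+1) = cv cards k - 1 := by
  rw [Pv, Finset.sum_range_succ, if_neg (by omega), add_zero, cv_eq]
  have h0 : ((List.range k).map (fun j' => if k ≤ j' + Mv cards j' then cv cards j' else 0)).sum
      = ∑ j ∈ Finset.range k, (if k ≤ j + Mv cards j then cv cards j else 0) := rfl
  rw [h0]
  have h1 : ∀ j ∈ Finset.range k, (if j + 1 < k + 1 ∧ k + 1 ≤ j + Mv cards j + 1 then cv cards j else 0)
      = (if k ≤ j + Mv cards j then cv cards j else 0) := by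
    intro j hj
    have hjk := Finset.mem_range.mp hj
    split_ifs <;> first | rfl | (exfalso; omega)
  rw [Finset.sum_congr rfl h1]
  ring

lemma Pv_succ_eq (cards : List (List Int × List Int)) (k : Nat) (hk : k < cards.length) :
    Pv cards k + Dv cards k k = Pv cards (k+1) := by
  rw [Pv, Dv, Pv, Finset.sum_range_succ (f := fun j => if j + 1 < k + 1 ∧ k + 1 ≤ j + Mv cards j + 1 then cv cards j else 0),
    if_neg (by omega), add_zero, ← Finset.sum_add_distrib]
  apply Finset.sum_congr rfl
  intro j hj
  have hjk := Finset.mem_range.mp hj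
  simp only [eminv]
  split_ifs <;> first | (exfalso; omega) | ring

-- effect of the second difference-array write on an abstract intermediate list
lemma Dv_succ (cards : List (List Int × List Int)) (k t : Nat) :
    Dv cards (k+1) t = Dv cards k t + ((if k + 1 = t then cv cards k else 0)
      - (if eminv cards k = t then cv cards k else 0)) := by
  rw [Dv, Finset.sum_range_succ, ← Dv]

lemma stepDelta (cards : List (List Int × List Int)) (k : Nat)
    (d1 : List Int) (hlen1 : d1.length = cards.length + 1)
    (hget1 : ∀ t : Nat, d1.getD t 0 = Dv cards k t + (if t = k+1 then cv cards k else 0)) :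
    ∀ t : Nat, (PySem.List.pySetD d1 ((eminv cards k : Nat) : Int)
      (PySem.List.pyGetD d1 ((eminv cards k : Nat) : Int) 0 - cv cards k)).getD t 0
      = Dv cards (k+1) t := by
  intro t
  rw [PySem.List.pySetD_natCast, PySem.List.pyGetD_natCast,
    getD_set d1 (eminv cards k) t _ (by rw [hlen1]; simp only [eminv]; omega),
    hget1 t, hget1 (eminv cards k), Dv_succ]
  split_ifs <;> (try subst t) <;>
    first | (exfalso; simp only [eminv] at *; omega) | (exfalso; omega) | ring

-- B's loop invariant
lemma outerB (cards : List (List Int × List Int)) : ∀ (rest : List (List Int × List Int)) (k : Nat)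
    (delta : List Int), rest = cards.drop k → k ≤ cards.length →
    delta.length = cards.length + 1 → (∀ t : Nat, delta.getD t 0 = Dv cards k t) →
    ((PySem.List.enumerate rest (k:Int)).foldl (fun st p =>
      let delta := st.1
      let pending := st.2.1 + PySem.List.pyGetD delta p.1 0
      let copies := 1 + pending
      let m : Int := (PySem.Set.inter (PySem.Set.ofList p.2.1) p.2.2).length
      let total := st.2.2 + copies * m
      let delta := PySem.List.pySetD delta (p.1 + 1)
        (PySem.List.pyGetD delta (p.1 + 1) 0 + copies)
      let e := min (cards.length : Int) (p.1 + m + 1)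
      let delta := PySem.List.pySetD delta e (PySem.List.pyGetD delta e 0 - copies)
      (delta, pending, total)) (delta, Pv cards k, Tv cards k)).2.2 = Tv cards cards.length := by
  intro rest
  induction rest with
  | nil =>
    intro k delta hdrop hk hlen hdget
    have hlenk : cards.length ≤ k := List.drop_eq_nil_iff.mp hdrop.symm
    have hkn : k = cards.length := le_antisymm hk hlenk
    subst hkn
    simp only [PySem.List.enumerate_nil, List.foldl_nil]
  | cons p rest' ih =>
    intro k delta hdrop hk hlen hdget
    have hklt : k < cards.length := by
      by_contra h
      have hnil : cards.drop k = [] := List.drop_eq_nil_iff.mpr (by omega)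
      rw [hnil] at hdrop
      exact absurd hdrop (by simp)
    have hp : cards.getD k ([],[]) = p := getD_of_drop_cons cards k p rest' ([],[]) hdrop.symm
    have hpm : (((PySem.Set.inter (PySem.Set.ofList p.1) p.2).length : Nat) : Int)
        = ((Mv cards k : Nat) : Int) := by
      rw [Mv, hp]
    rw [PySem.List.enumerate_cons]
    simp only [List.foldl_cons]
    -- reduce the step applied to the explicit triple
    have hread : PySem.List.pyGetD delta (k:Int) 0 = Dv cards k k := by
      rw [PySem.List.pyGetD_natCast]
      exact hdget k
    have hpend : Pv cards k + PySem.List.pyGetD delta (k:Int) 0 = Pv cards (k+1) := by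
      rw [hread]
      exact Pv_succ_eq cards k hklt
    have hcop : (1:Int) + Pv cards (k+1) = cv cards k := by
      rw [Pv_succ_cv]; ring
    have htot : Tv cards k + cv cards k * ((Mv cards k : Nat) : Int) = Tv cards (k+1) := by
      rw [Tv, Tv, Finset.sum_range_succ]
      ring
    have he : min ((cards.length : Nat) : Int) ((k:Int) + ((Mv cards k : Nat) : Int) + 1)
        = ((eminv cards k : Nat) : Int) := by
      rw [eminv]; push_cast; omega
    have hcast : (k:Int) + 1 = ((k+1 : Nat) : Int) := by push_cast; ring
    -- the new delta list
    have hlen1 : (PySem.List.pySetD delta ((k+1 : Nat) : Int) (PySem.List.pyGetD delta ((k+1 : Nat) : Int) 0 + cv cards k)).length = cards.length + 1 := by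
      rw [PySem.List.length_pySetD, hlen]
    have hget1 : ∀ t : Nat, (PySem.List.pySetD delta ((k+1 : Nat) : Int) (PySem.List.pyGetD delta ((k+1 : Nat) : Int) 0 + cv cards k)).getD t 0
        = Dv cards k t + (if t = k+1 then cv cards k else 0) := by
      intro t
      rw [PySem.List.pySetD_natCast, getD_set delta (k+1) t _ (by omega)]
      split_ifs with h
      · rw [PySem.List.pyGetD_natCast, hdget (k+1), h]
      · rw [hdget t]; ring
    have hget2 := stepDelta cards k _ hlen1 hget1
    have hlen2 :
        (PySem.List.pySetD (PySem.List.pySetD delta ((k+1 : Nat) : Int) (PySem.List.pyGetD delta ((k+1 : Nat) : Int) 0 + cv cards k))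
          ((eminv cards k : Nat) : Int)
          (PySem.List.pyGetD (PySem.List.pySetD delta ((k+1 : Nat) : Int) (PySem.List.pyGetD delta ((k+1 : Nat) : Int) 0 + cv cards k)) ((eminv cards k : Nat) : Int) 0 - cv cards k)).length = cards.length + 1 := by
      rw [PySem.List.length_pySetD, hlen1]
    -- rewrite the accumulated state into canonical (delta₂, Pv (k+1), Tv (k+1)) form
    show (List.foldl _ (_, Pv cards k + PySem.List.pyGetD delta (k:Int) 0, _) (PySem.List.enumerate rest' ((k:Int)+1))).2.2 = _
    rw [hcast, hpend, hcop, hpm, he, htot]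
    exact ih (k+1) _ (drop_succ_of_drop_cons cards k p rest' hdrop.symm).symm (by omega) hlen2 hget2

lemma partB_closed (cards : List (List Int × List Int)) :
    part_2_alt cards = Tv cards cards.length := by
  have hPv0 : Pv cards 0 = 0 := by rw [Pv]; simp
  have hTv0 : Tv cards 0 = (cards.length : Int) := by rw [Tv]; simp
  have h := outerB cards cards 0 (List.replicate (cards.length + 1) 0)
    (List.drop_zero (l := cards)).symm (Nat.zero_le _) (by rw [List.length_replicate])
    (by
      intro t
      rw [getD_replicate, Dv]
      simp)
  rw [Nat.cast_zero, hPv0, hTv0] at h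
  exact h

-- ===== VERDICT (by name: the statement is the Claim_ definition above) =====
theorem part_2_spec : Claim_equal_part_2 := by
  intro cards _
  unfold Spec_part_2
  rw [partA_closed, partB_closed, Tv]
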